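-- pv_equiv track=rewrite | github.com/Garl4nd/Exercises | Hashes/highlight.py | highlight2
-- ===== SOURCE A (Python) =====
-- from collections import deque
--
-- def highlight2(text,keywords): # Lepší než highlight, ale musí se používat hledání ve frontě. Vhondější je řešení přes linked list, kde se přímo trackuje node pro každé slovo, viz highlight3.
--     posdict={}
--
--     wnum=len(keywords)
--     textwords=text.split()
--     maxlen=len(textwords)
--     entry_queue=deque()
--
--     l,u=0,0
--     comp=True
--     for ind,word in enumerate(textwords):
--
--         if word in keywords:
--
--             if entry_queue:
--                 if word in entry_queue:
--                     if word==entry_queue[0]: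
--                         comp=True
--                     entry_queue.remove(word)
--             entry_queue.append(word)
--
--             posdict[word]=ind
--             if len(posdict)==wnum:
--                 mx,mn=ind,posdict[entry_queue[0]]
--
--
--                 if comp and (dif:=ind-mn)<maxlen:
--                     comp=False
--                     maxlen=dif
--                     l,u=mn,mx
--
--     return l,u
-- ===== SOURCE B (Python) =====
-- def highlight2(text, keywords):
--     words = text.split()
--     wnum = len(keywords)
--     kw = set(keywords)
--     count = {}          # word -> number of occurrences inside the current window [lo, hi]
--     have = 0            # number of distinct keywords inside the window
--     lo = 0
--     best_l, best_u = 0, 0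
--     bestlen = len(words)
--     for hi, w in enumerate(words):
--         if w in kw:
--             c = count.get(w, 0) + 1
--             count[w] = c
--             if c == 1:
--                 have += 1
--             if have == wnum:
--                 # shrink the window from the left as far as coverage allows
--                 while True:
--                     x = words[lo]
--                     if x in kw:
--                         if count[x] == 1:
--                             break
--                         count[x] = count[x] - 1
--                     lo += 1
--                 if hi - lo < bestlen:
--                     bestlen = hi - lo
--                     best_l, best_u = lo, hi
--     return best_l, best_u
-- ===== Notes on version B (the rewrite author's own statement) =====
-- stated objective: alternative
-- what changed: A's single pass over last occurrences with a recency deque (membership scan, remove, front peek) and a comp flag is replaced by the classic two-pointer sliding window: per-word occurrence counts in the window, a left pointer advanced while coverage is preserved, and the candidate window checked at every full-coverage position.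
import Mathlib
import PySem

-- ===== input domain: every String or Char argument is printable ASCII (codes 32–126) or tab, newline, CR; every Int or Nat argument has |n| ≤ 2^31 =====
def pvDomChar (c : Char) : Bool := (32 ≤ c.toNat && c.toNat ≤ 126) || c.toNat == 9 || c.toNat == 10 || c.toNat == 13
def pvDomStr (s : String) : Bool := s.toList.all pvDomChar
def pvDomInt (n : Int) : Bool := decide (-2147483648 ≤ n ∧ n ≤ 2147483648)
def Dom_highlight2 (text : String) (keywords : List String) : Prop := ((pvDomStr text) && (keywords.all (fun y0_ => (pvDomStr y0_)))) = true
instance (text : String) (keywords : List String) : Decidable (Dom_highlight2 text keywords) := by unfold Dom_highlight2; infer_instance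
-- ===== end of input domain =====

-- B replaces A's single pass over last occurrences (recency deque with membership scan /
-- remove / front peek, plus a `comp` skip flag) by the classic two-pointer sliding window:
-- occurrence counts per word in the current window and a left pointer advanced while full
-- coverage is preserved (alternative algorithm; similar measured cost).

-- ===== PORT A =====
-- state: (posdict, entry_queue, comp, maxlen, l, u)
def highlight2Step (keywords : List String) (wnum : Int)
    (s : PySem.Dict String Int × List String × Bool × Int × Int × Int)
    (iw : Int × String) :
    PySem.Dict String Int × List String × Bool × Int × Int × Int :=
  match s with
  | (posdict, eq, comp, maxlen, l, u) =>
    let ind := iw.1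
    let word := iw.2
    if word ∈ keywords then
      -- `if entry_queue: if word in entry_queue: …` (comp set first, then remove)
      let comp1 := if eq ≠ [] ∧ word ∈ eq ∧ word = eq.headD "" then true else comp
      let eq1 := if eq ≠ [] ∧ word ∈ eq then (PySem.List.remove? eq word).getD eq else eq
      let eq2 := eq1 ++ [word]
      let posdict2 := posdict.insert word ind
      if (posdict2.size : Int) = wnum then
        -- posdict[entry_queue[0]]: the key is always present, so getD is exact here
        let mn := posdict2.getD (eq2.headD "") 0
        if comp1 = true ∧ ind - mn < maxlen then
          (posdict2, eq2, false, ind - mn, mn, ind)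
        else (posdict2, eq2, comp1, maxlen, l, u)
      else (posdict2, eq2, comp1, maxlen, l, u)
    else s

def highlight2 (text : String) (keywords : List String) : Int × Int :=
  let textwords := PySem.Str.split₀ text
  let wnum : Int := keywords.length
  let st := (PySem.List.enumerate textwords).foldl (highlight2Step keywords wnum)
    (PySem.Dict.empty, [], true, (textwords.length : Int), 0, 0)
  (st.2.2.2.2.1, st.2.2.2.2.2)

-- ===== PORT B =====
-- the inner `while True` shrink loop; the fuel argument only totalizes it (the Python loop
-- terminates on every reachable state, and the proof shows the fuel is never exhausted there);
-- `words[lo]` / `count[x]` are in range / present on every reachable state, so getD is exact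
def shrinkLoop (kw : PySem.Set String) (words : List String) :
    Nat → PySem.Dict String Int → Int → PySem.Dict String Int × Int
  | 0, count, lo => (count, lo)
  | Nat.succ fuel, count, lo =>
    let x := (PySem.List.pyGet? words lo).getD ""
    if x ∈ kw then
      if count.getD x 0 = 1 then (count, lo)
      else shrinkLoop kw words fuel (count.insert x (count.getD x 0 - 1)) (lo + 1)
    else shrinkLoop kw words fuel count (lo + 1)

-- state: (count, have, lo, bestlen, best_l, best_u)
def highlight2AltStep (kw : PySem.Set String) (words : List String) (wnum : Int)
    (s : PySem.Dict String Int × Int × Int × Int × Int × Int)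
    (iw : Int × String) :
    PySem.Dict String Int × Int × Int × Int × Int × Int :=
  match s with
  | (count, hav, lo, bestlen, bl, bu) =>
    let hi := iw.1
    let w := iw.2
    if w ∈ kw then
      let c := count.getD w 0 + 1
      let count1 := count.insert w c
      let hav1 := if c = 1 then hav + 1 else hav
      if hav1 = wnum then
        let r := shrinkLoop kw words words.length count1 lo
        if hi - r.2 < bestlen then (r.1, hav1, r.2, hi - r.2, r.2, hi)
        else (r.1, hav1, r.2, bestlen, bl, bu)
      else (count1, hav1, lo, bestlen, bl, bu)
    else s

def highlight2_alt (text : String) (keywords : List String) : Int × Int :=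
  let words := PySem.Str.split₀ text
  let wnum : Int := keywords.length
  let kw := PySem.Set.ofList keywords
  let st := (PySem.List.enumerate words).foldl (highlight2AltStep kw words wnum)
    (PySem.Dict.empty, 0, 0, (words.length : Int), 0, 0)
  (st.2.2.2.2.1, st.2.2.2.2.2)

-- ===== PRECONDITION & SPEC =====
def Spec_highlight2 (text : String) (keywords : List String) (out : Int × Int) : Prop := out = highlight2_alt text keywords
instance (text : String) (keywords : List String) (out : Int × Int) : Decidable (Spec_highlight2 text keywords out) := by unfold Spec_highlight2; infer_instance

-- ===== CLAIM (what is proved, stated in full; the proofs are below) =====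
def Claim_equal_highlight2 : Prop := ∀ (text : String) (keywords : List String), Dom_highlight2 text keywords → Spec_highlight2 text keywords (highlight2 text keywords)

-- ===== LEMMAS AND PROOFS =====

-- number of occurrences of x among positions [lo, i) of ws
def occW (ws : List String) (lo i : Nat) (x : String) : Nat := ((ws.take i).drop lo).count x

-- j is the last occurrence of x before position i
def IsLast (ws : List String) (i : Nat) (x : String) (j : Nat) : Prop :=
  j < i ∧ ws[j]? = some x ∧ ∀ k : Nat, j < k → k < i → ws[k]? ≠ some x

lemma occW_cons (ws : List String) (lo i : Nat) (x w : String)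
    (hlo : lo < i) (hi : i ≤ ws.length) (hw : ws[lo]? = some w) :
    occW ws lo i x = (if w = x then 1 else 0) + occW ws (lo+1) i x := by
  have hlt : lo < (ws.take i).length := by simp [List.length_take]; omega
  have hlol : lo < ws.length := by omega
  have hget : (ws.take i)[lo]'hlt = w := by
    rw [List.getElem_take]
    exact (List.getElem?_eq_some_iff.mp hw).choose_spec
  rw [occW, List.drop_eq_getElem_cons hlt, List.count_cons, hget, occW]
  rcases eq_or_ne w x with hxw | hxw
  · simp [hxw]
    omega
  · simp [hxw]

lemma occW_zero (ws : List String) (lo i : Nat) (x : String)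
    (h : ∀ k : Nat, lo ≤ k → k < i → ws[k]? ≠ some x) : occW ws lo i x = 0 := by
  rw [occW, List.count_eq_zero]
  intro hmem
  obtain ⟨n, hn, he⟩ := List.mem_iff_getElem.mp hmem
  have h1 : lo + n < (ws.take i).length := by
    have := List.length_drop (l := ws.take i) (i := lo); omega
  have h2 : lo + n < i := by simp [List.length_take] at h1; omega
  have h3 : ws[lo + n]? = some x := by
    have : (ws.take i)[lo + n]'h1 = x := by
      rw [← he]; simp [List.getElem_drop]
    rw [← List.getElem?_take_of_lt h2]
    exact List.getElem?_eq_some_iff.mpr ⟨h1, this⟩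
  exact h (lo + n) (by omega) h2 h3

lemma occW_pos (ws : List String) (lo i j : Nat) (x : String)
    (hj1 : lo ≤ j) (hj2 : j < i) (hx : ws[j]? = some x) : 0 < occW ws lo i x := by
  rw [occW]
  apply List.count_pos_iff.mpr
  have : ((ws.take i).drop lo)[j - lo]? = some x := by
    rw [List.getElem?_drop]
    have : lo + (j - lo) = j := by omega
    rw [this, List.getElem?_take_of_lt hj2, hx]
  exact List.mem_of_getElem? this

lemma occW_last_eq_one (ws : List String) (i m : Nat) (x : String)
    (hi : i ≤ ws.length) (h : IsLast ws i x m) : occW ws m i x = 1 := by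
  obtain ⟨hmi, hocc, hafter⟩ := h
  rw [occW_cons ws m i x x hmi hi hocc, if_pos rfl,
    occW_zero ws (m+1) i x (fun k hk1 hk2 => hafter k (by omega) hk2)]

lemma occW_snoc (ws : List String) (lo i : Nat) (x w : String)
    (hlo : lo ≤ i) (hi : i < ws.length) (hw : ws[i]? = some w) :
    occW ws lo (i+1) x = occW ws lo i x + (if w = x then 1 else 0) := by
  have hwl : ws[i]?.toList = [w] := by rw [hw]; rfl
  have hlen : (ws.take i).length = i := by simp [List.length_take]; omega
  rw [occW, occW, List.take_add_one, hwl, List.drop_append_of_le_length (by omega),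
    List.count_append]
  by_cases hxw : w = x <;> simp [hxw]

-- the loop invariant: after processing the first i words,
-- A's state (posdict, entry_queue, comp, maxlen, l, u) and
-- B's state (count, have, lo, bestlen, best_l, best_u) are related as follows
def HInv (ws kws : List String) (i : Nat)
    (sA : PySem.Dict String Int × List String × Bool × Int × Int × Int)
    (sB : PySem.Dict String Int × Int × Int × Int × Int × Int) : Prop :=
  match sA, sB with
  | (pd, eq, comp, maxlen, l, u), (count, hav, lo, bestlen, bl, bu) =>
      eq.Nodup ∧
      pd.keys.Perm eq ∧
      (∀ w, w ∈ eq ↔ w ∈ kws ∧ ∃ j : Nat, j < i ∧ ws[j]? = some w) ∧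
      (∀ w ∈ eq, ∃ j : Nat, pd.getD w 0 = (j : Int) ∧ IsLast ws i w j) ∧
      List.Pairwise (fun a b => pd.getD a 0 < pd.getD b 0) eq ∧
      count.keys.Perm eq ∧
      hav = (eq.length : Int) ∧
      (∃ lon : Nat, lo = (lon : Int) ∧ lon ≤ i ∧
        (∀ w ∈ eq, count.getD w 0 = (occW ws lon i w : Int)) ∧
        (∀ w ∈ eq, (lon : Int) ≤ pd.getD w 0)) ∧
      (maxlen = bestlen ∧ l = bl ∧ u = bu) ∧
      (comp = false → eq.length = kws.length ∧ pd.getD (eq.headD "") 0 = l ∧ maxlen = u - l ∧ u < (i : Int))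

-- the shrink loop lands exactly on the minimum last occurrence m
lemma shrink_spec (kws ws eqq : List String) (i m : Nat) (hi : i ≤ ws.length)
    (w0 : String) (hw0 : w0 ∈ eqq) (hlastm : IsLast ws i w0 m)
    (hsub : ∀ w ∈ eqq, w ∈ kws)
    (hlast : ∀ w ∈ eqq, ∃ j : Nat, m ≤ j ∧ IsLast ws i w j)
    (hclosed : ∀ (j : Nat) (w : String), j < i → ws[j]? = some w → w ∈ kws → w ∈ eqq) :
    ∀ (fuel : Nat) (count : PySem.Dict String Int) (lon : Nat),
      count.keys.Perm eqq →
      (∀ w ∈ eqq, count.getD w 0 = (occW ws lon i w : Int)) →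
      lon ≤ m → m + 1 ≤ lon + fuel →
      ∃ count₂, shrinkLoop (PySem.Set.ofList kws) ws fuel count (lon : Int) = (count₂, (m : Int)) ∧
        count₂.keys.Perm eqq ∧
        (∀ w ∈ eqq, count₂.getD w 0 = (occW ws m i w : Int)) := by
  intro fuel
  induction fuel with
  | zero => intro count lon _ _ hlom hfuel; omega
  | succ fuel ih =>
    intro count lon hkeys hocc hlom hfuel
    have hmi : m < i := hlastm.1
    have hlonlt : lon < ws.length := by omega
    have hxg : ws[lon]? = some (ws[lon]'hlonlt) := List.getElem?_eq_getElem hlonlt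
    have hpy : (PySem.List.pyGet? ws ((lon : Nat) : Int)).getD "" = ws[lon]'hlonlt := by
      rw [PySem.List.pyGet?_natCast ws lon, hxg]; rfl
    rw [shrinkLoop]
    simp only [hpy]
    rcases Nat.lt_or_ge lon m with hlt | hge
    · -- lon < m : advance
      by_cases hxkw : ws[lon]'hlonlt ∈ kws
      · -- keyword with a later occurrence: count ≥ 2, decrement
        have hxeq : ws[lon]'hlonlt ∈ eqq := hclosed lon _ (by omega) hxg hxkw
        obtain ⟨jx, hjm, hjlast⟩ := hlast _ hxeq
        have hsplit : occW ws lon i (ws[lon]'hlonlt) = 1 + occW ws (lon+1) i (ws[lon]'hlonlt) := by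
          rw [occW_cons ws lon i _ _ (by omega) hi hxg, if_pos rfl]
        have hpos : 0 < occW ws (lon+1) i (ws[lon]'hlonlt) :=
          occW_pos ws (lon+1) i jx _ (by omega) hjlast.1 hjlast.2.1
        have hcv : count.getD (ws[lon]'hlonlt) 0 = (occW ws lon i (ws[lon]'hlonlt) : Int) := hocc _ hxeq
        have hne1 : ¬ count.getD (ws[lon]'hlonlt) 0 = 1 := by rw [hcv]; omega
        rw [if_pos (by simpa [PySem.Set.mem_ofList] using hxkw), if_neg hne1]
        have hcast : (lon : Int) + 1 = ((lon + 1 : Nat) : Int) := by push_cast; ring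
        rw [hcast]
        apply ih (count.insert (ws[lon]'hlonlt) (count.getD (ws[lon]'hlonlt) 0 - 1)) (lon+1)
        · have hcont : count.contains (ws[lon]'hlonlt) = true :=
            (PySem.Dict.contains_iff_mem_keys _ _).mpr (hkeys.mem_iff.mpr hxeq)
          rw [PySem.Dict.keys_insert_of_contains count _ hcont]
          exact hkeys
        · intro w hw
          by_cases hwx : w = ws[lon]'hlonlt
          · subst hwx
            rw [PySem.Dict.getD_insert_self, hcv, hsplit]; push_cast; ring
          · rw [PySem.Dict.getD_insert_of_ne count _ 0 hwx, hocc w hw,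
              occW_cons ws lon i w _ (by omega) hi hxg, if_neg (fun hx => hwx hx.symm)]
            push_cast; ring
        · omega
        · omega
      · -- not a keyword: just advance
        rw [if_neg (by simpa [PySem.Set.mem_ofList] using hxkw)]
        have hcast : (lon : Int) + 1 = ((lon + 1 : Nat) : Int) := by push_cast; ring
        rw [hcast]
        apply ih count (lon+1)
        · exact hkeys
        · intro w hw
          rw [hocc w hw, occW_cons ws lon i w _ (by omega) hi hxg,
            if_neg (fun hx => hxkw (by rw [hx]; exact hsub w hw))]
          push_cast; ring
        · omega
        · omega
    · -- lon = m : break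
      have hem : lon = m := by omega
      subst hem
      have hx0 : ws[lon]'hlonlt = w0 := by
        have := hlastm.2.1
        rw [hxg] at this
        exact Option.some_inj.mp this
      rw [hx0, if_pos (by simpa [PySem.Set.mem_ofList] using hsub w0 hw0)]
      have h1 : count.getD w0 0 = 1 := by
        rw [hocc w0 hw0, occW_last_eq_one ws i lon w0 hi hlastm]; rfl
      rw [if_pos h1]
      exact ⟨count, rfl, hkeys, hocc⟩

-- common tail of a keyword step: both loops see the same candidate window
lemma go_inv (ws kws : List String) (i : Nat) (w : String) (hilen : i < ws.length)
    (pd count : PySem.Dict String Int) (eq2 : List String)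
    (comp1 : Bool) (hav1 maxlen l u : Int) (lon : Nat) (c : Int)
    (hne2 : eq2 ≠ [])
    (h1' : eq2.Nodup)
    (h2' : (pd.insert w (i : Int)).keys.Perm eq2)
    (h3' : ∀ x, x ∈ eq2 ↔ x ∈ kws ∧ ∃ j : Nat, j < i + 1 ∧ ws[j]? = some x)
    (h4' : ∀ x ∈ eq2, ∃ j : Nat, (pd.insert w (i : Int)).getD x 0 = (j : Int) ∧ IsLast ws (i+1) x j)
    (h5' : List.Pairwise (fun a b => (pd.insert w (i : Int)).getD a 0 < (pd.insert w (i : Int)).getD b 0) eq2)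
    (h6k : (count.insert w c).keys.Perm eq2)
    (h6o : ∀ x ∈ eq2, (count.insert w c).getD x 0 = (occW ws lon (i+1) x : Int))
    (h6m : ∀ x ∈ eq2, (lon : Int) ≤ (pd.insert w (i : Int)).getD x 0)
    (hloni : lon ≤ i)
    (hhav : hav1 = (eq2.length : Int))
    (hc1 : comp1 = false → eq2.length = kws.length ∧
      (pd.insert w (i : Int)).getD (eq2.headD "") 0 = l ∧ maxlen = u - l ∧ u < (i : Int)) :
    HInv ws kws (i+1)
      (if ((pd.insert w (i : Int)).size : Int) = (kws.length : Int) then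
         if comp1 = true ∧ (i : Int) - (pd.insert w (i : Int)).getD (eq2.headD "") 0 < maxlen then
           (pd.insert w (i : Int), eq2, false, (i : Int) - (pd.insert w (i : Int)).getD (eq2.headD "") 0,
            (pd.insert w (i : Int)).getD (eq2.headD "") 0, (i : Int))
         else (pd.insert w (i : Int), eq2, comp1, maxlen, l, u)
       else (pd.insert w (i : Int), eq2, comp1, maxlen, l, u))
      (if hav1 = (kws.length : Int) then
         if (i : Int) - (shrinkLoop (PySem.Set.ofList kws) ws ws.length (count.insert w c) (lon : Int)).2 < maxlen then
           ((shrinkLoop (PySem.Set.ofList kws) ws ws.length (count.insert w c) (lon : Int)).1, hav1,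
            (shrinkLoop (PySem.Set.ofList kws) ws ws.length (count.insert w c) (lon : Int)).2,
            (i : Int) - (shrinkLoop (PySem.Set.ofList kws) ws ws.length (count.insert w c) (lon : Int)).2,
            (shrinkLoop (PySem.Set.ofList kws) ws ws.length (count.insert w c) (lon : Int)).2, (i : Int))
         else ((shrinkLoop (PySem.Set.ofList kws) ws ws.length (count.insert w c) (lon : Int)).1, hav1,
            (shrinkLoop (PySem.Set.ofList kws) ws ws.length (count.insert w c) (lon : Int)).2, maxlen, l, u)
       else (count.insert w c, hav1, (lon : Int), maxlen, l, u)) := by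
  have hszA : ((pd.insert w (i : Int)).size : Int) = (kws.length : Int) ↔ eq2.length = kws.length := by
    have h1 : (pd.insert w (i : Int)).size = (pd.insert w (i : Int)).keys.length := by
      simp [PySem.Dict.size, PySem.Dict.keys]
    rw [h1, h2'.length_eq]
    exact Int.natCast_inj
  have hszB : hav1 = (kws.length : Int) ↔ eq2.length = kws.length := by
    rw [hhav]; exact Int.natCast_inj
  by_cases hfull : eq2.length = kws.length
  · -- full coverage: both sides examine the same candidate window
    have hh0mem : eq2.headD "" ∈ eq2 := by
      cases eq2 with
      | nil => exact absurd rfl hne2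
      | cons a t => simp
    obtain ⟨m, hgm, hlm⟩ := h4' _ hh0mem
    have hmlt : m < i + 1 := hlm.1
    have hminI : ∀ x ∈ eq2, (pd.insert w (i : Int)).getD (eq2.headD "") 0 ≤ (pd.insert w (i : Int)).getD x 0 := by
      cases eq2 with
      | nil => exact absurd rfl hne2
      | cons a t =>
          intro x hx
          rcases List.mem_cons.mp hx with hx | hx
          · subst hx; simp
          · exact le_of_lt ((List.pairwise_cons.mp h5').1 x hx)
    have hlast2 : ∀ x ∈ eq2, ∃ j : Nat, m ≤ j ∧ IsLast ws (i+1) x j := by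
      intro x hx
      obtain ⟨jx, hgx, hlx⟩ := h4' x hx
      refine ⟨jx, ?_, hlx⟩
      have := hminI x hx
      rw [hgm, hgx] at this
      exact_mod_cast this
    have hsub2 : ∀ x ∈ eq2, x ∈ kws := fun x hx => ((h3' x).mp hx).1
    have hclosed2 : ∀ (j : Nat) (x : String), j < i + 1 → ws[j]? = some x → x ∈ kws → x ∈ eq2 :=
      fun j x hj hw hk => (h3' x).mpr ⟨hk, j, hj, hw⟩
    have hlonm : lon ≤ m := by
      have := h6m _ hh0mem
      rw [hgm] at this
      exact_mod_cast this
    obtain ⟨count2, hsh, hkeys2, hocc2⟩ := shrink_spec kws ws eq2 (i+1) m (by omega) _ hh0mem hlm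
      hsub2 hlast2 hclosed2 ws.length (count.insert w c) lon h6k h6o hlonm (by omega)
    rw [if_pos (hszA.mpr hfull), if_pos (hszB.mpr hfull), hsh]
    simp only []
    by_cases hcomp : comp1 = true
    · rw [hgm]
      by_cases hlt : (i : Int) - (m : Int) < maxlen
      · rw [if_pos ⟨hcomp, hlt⟩, if_pos hlt]
        refine ⟨h1', h2', h3', h4', h5', hkeys2, hhav,
          ⟨m, rfl, by omega, hocc2, ?_⟩, ⟨rfl, rfl, rfl⟩, ?_⟩
        · intro x hx
          have := hminI x hx
          rw [hgm] at this
          exact this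
        · intro _
          exact ⟨hfull, hgm, by ring, by exact_mod_cast Nat.lt_succ_self i⟩
      · rw [if_neg (fun hx => hlt hx.2), if_neg hlt]
        refine ⟨h1', h2', h3', h4', h5', hkeys2, hhav,
          ⟨m, rfl, by omega, hocc2, ?_⟩, ⟨rfl, rfl, rfl⟩, ?_⟩
        · intro x hx
          have := hminI x hx
          rw [hgm] at this
          exact this
        · intro hcf
          exact absurd hcomp (by simp [hcf])
    · have hcf : comp1 = false := by simpa using hcomp
      obtain ⟨-, hheadl, hml, hui⟩ := hc1 hcf
      have hml2 : (m : Int) = l := by rw [← hgm, hheadl]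
      have hnlt : ¬ (i : Int) - (m : Int) < maxlen := by rw [hml2]; omega
      rw [hgm, if_neg (fun hx => absurd hx.1 (by simp [hcf])), if_neg hnlt]
      refine ⟨h1', h2', h3', h4', h5', hkeys2, hhav,
        ⟨m, rfl, by omega, hocc2, ?_⟩, ⟨rfl, rfl, rfl⟩, ?_⟩
      · intro x hx
        have := hminI x hx
        rw [hgm] at this
        exact this
      · intro _
        refine ⟨hfull, hheadl, hml, by omega⟩
  · rw [if_neg (fun hx => hfull (hszA.mp hx)), if_neg (fun hx => hfull (hszB.mp hx))]
    refine ⟨h1', h2', h3', h4', h5', h6k, hhav,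
      ⟨lon, rfl, by omega, h6o, h6m⟩, ⟨rfl, rfl, rfl⟩, ?_⟩
    intro hcf
    exact absurd (hc1 hcf).1 hfull

-- one step of both loops preserves the invariant
lemma hinv_step (ws kws : List String) (i : Nat) (w : String)
    (hiw : ws[i]? = some w) (hilen : i < ws.length)
    (sA : PySem.Dict String Int × List String × Bool × Int × Int × Int)
    (sB : PySem.Dict String Int × Int × Int × Int × Int × Int)
    (h : HInv ws kws i sA sB) :
    HInv ws kws (i+1)
      (highlight2Step kws (kws.length : Int) sA ((i : Int), w))
      (highlight2AltStep (PySem.Set.ofList kws) ws (kws.length : Int) sB ((i : Int), w)) := by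
  rcases sA with ⟨pd, eq, comp, maxlen, l, u⟩
  rcases sB with ⟨count, hav, lo, bestlen, bl, bu⟩
  obtain ⟨h1, h2, h3, h4, h5, h6, h7, ⟨lon, hlon, hloni, hocc, hlomin⟩, ⟨hm9, hl9, hu9⟩, h10⟩ := h
  subst hm9 hl9 hu9 hlon
  have hcontA : pd.contains w = true ↔ w ∈ eq := by
    rw [PySem.Dict.contains_iff_mem_keys, h2.mem_iff]
  have hcontB : count.contains w = true ↔ w ∈ eq := by
    rw [PySem.Dict.contains_iff_mem_keys, h6.mem_iff]
  by_cases hwk : w ∈ kws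
  · -- keyword step on both sides
    have hstepBkw : highlight2AltStep (PySem.Set.ofList kws) ws (kws.length : Int)
        (count, hav, (lon : Int), maxlen, l, u) ((i : Int), w) =
        (if (if count.getD w 0 + 1 = 1 then hav + 1 else hav) = (kws.length : Int) then
           if (i : Int) - (shrinkLoop (PySem.Set.ofList kws) ws ws.length (count.insert w (count.getD w 0 + 1)) (lon : Int)).2 < maxlen then
             ((shrinkLoop (PySem.Set.ofList kws) ws ws.length (count.insert w (count.getD w 0 + 1)) (lon : Int)).1,
              (if count.getD w 0 + 1 = 1 then hav + 1 else hav),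
              (shrinkLoop (PySem.Set.ofList kws) ws ws.length (count.insert w (count.getD w 0 + 1)) (lon : Int)).2,
              (i : Int) - (shrinkLoop (PySem.Set.ofList kws) ws ws.length (count.insert w (count.getD w 0 + 1)) (lon : Int)).2,
              (shrinkLoop (PySem.Set.ofList kws) ws ws.length (count.insert w (count.getD w 0 + 1)) (lon : Int)).2, (i : Int))
           else ((shrinkLoop (PySem.Set.ofList kws) ws ws.length (count.insert w (count.getD w 0 + 1)) (lon : Int)).1,
              (if count.getD w 0 + 1 = 1 then hav + 1 else hav),
              (shrinkLoop (PySem.Set.ofList kws) ws ws.length (count.insert w (count.getD w 0 + 1)) (lon : Int)).2, maxlen, l, u)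
         else (count.insert w (count.getD w 0 + 1), (if count.getD w 0 + 1 = 1 then hav + 1 else hav), (lon : Int), maxlen, l, u)) := by
      simp only [highlight2AltStep]
      rw [if_pos (by simpa [PySem.Set.mem_ofList] using hwk)]
    -- facts about the new last occurrence of w and the extensions of the old ones
    have hIw : IsLast ws (i+1) w i :=
      ⟨Nat.lt_succ_self i, hiw, fun k hk1 hk2 => absurd (by omega : k < k) (lt_irrefl k)⟩
    have hext : ∀ x ∈ eq, x ≠ w → ∃ j : Nat, pd.getD x 0 = (j : Int) ∧ IsLast ws (i+1) x j := by
      intro x hx hxw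
      obtain ⟨jx, hgx, hlx⟩ := h4 x hx
      refine ⟨jx, hgx, by have := hlx.1; omega, hlx.2.1, fun k hk1 hk2 => ?_⟩
      by_cases hki : k = i
      · subst hki
        rw [hiw]
        exact fun hc => hxw (Option.some_inj.mp hc).symm
      · exact hlx.2.2 k hk1 (by omega)
    have hltI : ∀ x ∈ eq, pd.getD x 0 < (i : Int) := by
      intro x hx
      obtain ⟨jx, hgx, hlx⟩ := h4 x hx
      rw [hgx]
      exact_mod_cast hlx.1
    by_cases hweq : w ∈ eq
    · -- move-to-end
      have hne : eq ≠ [] := List.ne_nil_of_mem hweq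
      have herase : (PySem.List.remove? eq w).getD eq = eq.erase w := by
        rw [PySem.List.remove?_eq_some_erase eq w hweq, Option.getD_some]
      have hstepA : highlight2Step kws (kws.length : Int) (pd, eq, comp, maxlen, l, u) ((i : Int), w) =
          (if ((pd.insert w (i : Int)).size : Int) = (kws.length : Int) then
             if (if w = eq.headD "" then true else comp) = true ∧
                 (i : Int) - (pd.insert w (i : Int)).getD ((eq.erase w ++ [w]).headD "") 0 < maxlen then
               (pd.insert w (i : Int), eq.erase w ++ [w], false,
                (i : Int) - (pd.insert w (i : Int)).getD ((eq.erase w ++ [w]).headD "") 0,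
                (pd.insert w (i : Int)).getD ((eq.erase w ++ [w]).headD "") 0, (i : Int))
             else (pd.insert w (i : Int), eq.erase w ++ [w], (if w = eq.headD "" then true else comp), maxlen, l, u)
           else (pd.insert w (i : Int), eq.erase w ++ [w], (if w = eq.headD "" then true else comp), maxlen, l, u)) := by
        simp only [highlight2Step]
        rw [if_pos (c := w ∈ kws) hwk]
        by_cases hh : w = eq.headD ""
        · rw [if_pos (c := eq ≠ [] ∧ w ∈ eq ∧ w = eq.headD "") ⟨hne, hweq, hh⟩,
            if_pos (c := eq ≠ [] ∧ w ∈ eq) ⟨hne, hweq⟩, herase, if_pos (c := w = eq.headD "") hh]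
        · rw [if_neg (c := eq ≠ [] ∧ w ∈ eq ∧ w = eq.headD "") (fun hx => hh hx.2.2),
            if_pos (c := eq ≠ [] ∧ w ∈ eq) ⟨hne, hweq⟩, herase, if_neg (c := w = eq.headD "") hh]
      -- old count of w is positive, so `c = 1` is false and `have` stays
      obtain ⟨jw, hgw, hlw⟩ := h4 w hweq
      have hjwlon : lon ≤ jw := by
        have := hlomin w hweq
        rw [hgw] at this
        exact_mod_cast this
      have hcpos : 0 < occW ws lon i w := occW_pos ws lon i jw w hjwlon hlw.1 hlw.2.1
      have hcne1 : ¬ count.getD w 0 + 1 = 1 := by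
        rw [hocc w hweq]; omega
      rw [hstepA, hstepBkw, if_neg hcne1]
      have hmem2 : ∀ x, x ∈ eq.erase w ++ [w] ↔ x ∈ eq := by
        intro x
        rw [List.mem_append, h1.mem_erase_iff, List.mem_singleton]
        constructor
        · rintro (⟨-, hx⟩ | hx)
          · exact hx
          · exact hx ▸ hweq
        · intro hx
          by_cases hxw : x = w
          · exact Or.inr hxw
          · exact Or.inl ⟨hxw, hx⟩
      have hlen2 : (eq.erase w ++ [w]).length = eq.length := by
        rw [List.length_append, List.length_singleton, List.length_erase_of_mem hweq]
        have : 0 < eq.length := List.length_pos_of_mem hweq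
        omega
      have hperm2 : eq.Perm (eq.erase w ++ [w]) :=
        (List.perm_cons_erase hweq).trans (List.perm_append_singleton w (eq.erase w)).symm
      apply go_inv ws kws i w hilen pd count (eq.erase w ++ [w]) _ _ maxlen l u lon _
      · simp
      · exact (h1.erase w).append (List.nodup_singleton w)
          (by simp [List.disjoint_singleton, h1.mem_erase_iff])
      · rw [PySem.Dict.keys_insert_of_contains pd _ (hcontA.mpr hweq)]
        exact h2.trans hperm2
      · intro x
        rw [hmem2 x, h3 x]
        constructor
        · rintro ⟨hk, j, hj, hw⟩
          exact ⟨hk, j, by omega, hw⟩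
        · rintro ⟨hk, j, hj, hw⟩
          by_cases hji : j = i
          · subst hji
            rw [hiw] at hw
            refine ⟨hk, jw, hlw.1, ?_⟩
            rw [hlw.2.1, ← hw]
          · exact ⟨hk, j, by omega, hw⟩
      · intro x hx
        by_cases hxw : x = w
        · subst hxw
          exact ⟨i, by rw [PySem.Dict.getD_insert_self], hIw⟩
        · obtain ⟨jx, hgx, hlx⟩ := hext x ((hmem2 x).mp hx) hxw
          exact ⟨jx, by rw [PySem.Dict.getD_insert_of_ne pd _ 0 hxw]; exact hgx, hlx⟩
      · rw [List.pairwise_append]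
        refine ⟨?_, List.pairwise_singleton _ _, ?_⟩
        · have hsubl : (eq.erase w).Pairwise (fun a b => pd.getD a 0 < pd.getD b 0) :=
            h5.sublist (List.erase_sublist)
          refine hsubl.imp_of_mem ?_
          intro a b ha hb hab
          have haw : a ≠ w := (h1.mem_erase_iff.mp ha).1
          have hbw : b ≠ w := (h1.mem_erase_iff.mp hb).1
          rwa [PySem.Dict.getD_insert_of_ne pd _ 0 haw, PySem.Dict.getD_insert_of_ne pd _ 0 hbw]
        · intro a ha b hb
          rw [List.mem_singleton.mp hb]
          have haw : a ≠ w := (h1.mem_erase_iff.mp ha).1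
          rw [PySem.Dict.getD_insert_of_ne pd _ 0 haw, PySem.Dict.getD_insert_self]
          exact hltI a (h1.mem_erase_iff.mp ha).2
      · rw [PySem.Dict.keys_insert_of_contains count _ (hcontB.mpr hweq)]
        exact h6.trans hperm2
      · intro x hx
        by_cases hxw : x = w
        · rw [hxw, PySem.Dict.getD_insert_self, hocc w hweq,
            occW_snoc ws lon i w w hloni hilen hiw, if_pos rfl]
          push_cast; ring
        · rw [PySem.Dict.getD_insert_of_ne count _ 0 hxw, hocc x ((hmem2 x).mp hx),
            occW_snoc ws lon i x w hloni hilen hiw, if_neg (fun hc => hxw hc.symm)]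
          push_cast; ring
      · intro x hx
        by_cases hxw : x = w
        · subst hxw
          rw [PySem.Dict.getD_insert_self]
          exact_mod_cast hloni
        · rw [PySem.Dict.getD_insert_of_ne pd _ 0 hxw]
          exact hlomin x ((hmem2 x).mp hx)
      · exact hloni
      · rw [h7]
        exact_mod_cast congrArg (Nat.cast (R := Int)) hlen2.symm
      · intro hcf
        have hh : ¬ w = eq.headD "" := by
          intro hh
          rw [if_pos hh] at hcf
          simp at hcf
        have hcompf : comp = false := by rwa [if_neg hh] at hcf
        obtain ⟨hlen, hheadv, hml, hui⟩ := h10 hcompf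
        rcases eq with _ | ⟨e0, t⟩
        · exact absurd rfl hne
        · have he0w : ¬ ((e0 : String) == w) = true := by
            simp only [beq_iff_eq]
            exact fun hx => hh (by simp [hx.symm])
          have her : (e0 :: t).erase w = e0 :: t.erase w := List.erase_cons_tail he0w
          have he0w' : e0 ≠ w := by simpa using he0w
          refine ⟨by rw [hlen2]; exact hlen, ?_, hml, hui⟩
          rw [her]
          simp only [List.cons_append, List.headD_cons]
          rw [PySem.Dict.getD_insert_of_ne pd _ 0 he0w']
          simpa using hheadv
    · -- first occurrence of the keyword w
      have hstepA : highlight2Step kws (kws.length : Int) (pd, eq, comp, maxlen, l, u) ((i : Int), w) =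
          (if ((pd.insert w (i : Int)).size : Int) = (kws.length : Int) then
             if comp = true ∧ (i : Int) - (pd.insert w (i : Int)).getD ((eq ++ [w]).headD "") 0 < maxlen then
               (pd.insert w (i : Int), eq ++ [w], false,
                (i : Int) - (pd.insert w (i : Int)).getD ((eq ++ [w]).headD "") 0,
                (pd.insert w (i : Int)).getD ((eq ++ [w]).headD "") 0, (i : Int))
             else (pd.insert w (i : Int), eq ++ [w], comp, maxlen, l, u)
           else (pd.insert w (i : Int), eq ++ [w], comp, maxlen, l, u)) := by
        simp only [highlight2Step]
        rw [if_pos (c := w ∈ kws) hwk,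
          if_neg (c := eq ≠ [] ∧ w ∈ eq ∧ w = eq.headD "") (fun hx => hweq hx.2.1),
          if_neg (c := eq ≠ [] ∧ w ∈ eq) (fun hx => hweq hx.2)]
      have hc0 : count.getD w 0 = 0 :=
        PySem.Dict.getD_of_not_contains count 0 (by rw [Bool.eq_false_iff]; exact fun hc => hweq (hcontB.mp hc))
      have hnoocc : ∀ k : Nat, k < i → ws[k]? ≠ some w := by
        intro k hk hkw
        exact hweq ((h3 w).mpr ⟨hwk, k, hk, hkw⟩)
      rw [hstepA, hstepBkw, hc0]
      rw [if_pos (show (0 : Int) + 1 = 1 by norm_num)]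
      apply go_inv ws kws i w hilen pd count (eq ++ [w]) _ _ maxlen l u lon _
      · simp
      · exact h1.append (List.nodup_singleton w) (by simp [List.disjoint_singleton]; exact fun hc => hweq hc)
      · rw [PySem.Dict.keys_insert_of_not_contains pd _ (by rw [Bool.eq_false_iff]; exact fun hc => hweq (hcontA.mp hc))]
        exact h2.append (List.Perm.refl [w])
      · intro x
        rw [List.mem_append, List.mem_singleton, h3 x]
        constructor
        · rintro (⟨hk, j, hj, hw⟩ | hxw)
          · exact ⟨hk, j, by omega, hw⟩
          · exact ⟨hxw ▸ hwk, i, Nat.lt_succ_self i, hxw ▸ hiw⟩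
        · rintro ⟨hk, j, hj, hw⟩
          by_cases hji : j = i
          · subst hji
            rw [hiw] at hw
            exact Or.inr (Option.some_inj.mp hw).symm
          · exact Or.inl ⟨hk, j, by omega, hw⟩
      · intro x hx
        rcases List.mem_append.mp hx with hx | hx
        · have hxw : x ≠ w := fun hc => hweq (hc ▸ hx)
          obtain ⟨jx, hgx, hlx⟩ := hext x hx hxw
          exact ⟨jx, by rw [PySem.Dict.getD_insert_of_ne pd _ 0 hxw]; exact hgx, hlx⟩
        · rw [List.mem_singleton.mp hx]
          exact ⟨i, by rw [PySem.Dict.getD_insert_self], hIw⟩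
      · rw [List.pairwise_append]
        refine ⟨?_, List.pairwise_singleton _ _, ?_⟩
        · refine h5.imp_of_mem ?_
          intro a b ha hb hab
          have haw : a ≠ w := fun hc => hweq (hc ▸ ha)
          have hbw : b ≠ w := fun hc => hweq (hc ▸ hb)
          rwa [PySem.Dict.getD_insert_of_ne pd _ 0 haw, PySem.Dict.getD_insert_of_ne pd _ 0 hbw]
        · intro a ha b hb
          rw [List.mem_singleton.mp hb]
          have haw : a ≠ w := fun hc => hweq (hc ▸ ha)
          rw [PySem.Dict.getD_insert_of_ne pd _ 0 haw, PySem.Dict.getD_insert_self]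
          exact hltI a ha
      · rw [PySem.Dict.keys_insert_of_not_contains count _ (by rw [Bool.eq_false_iff]; exact fun hc => hweq (hcontB.mp hc))]
        exact h6.append (List.Perm.refl [w])
      · intro x hx
        rcases List.mem_append.mp hx with hx | hx
        · have hxw : x ≠ w := fun hc => hweq (hc ▸ hx)
          rw [PySem.Dict.getD_insert_of_ne count _ 0 hxw, hocc x hx,
            occW_snoc ws lon i x w hloni hilen hiw, if_neg (fun hc => hxw hc.symm)]
          push_cast; ring
        · rw [List.mem_singleton.mp hx, PySem.Dict.getD_insert_self,
            occW_snoc ws lon i w w hloni hilen hiw, if_pos rfl,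
            occW_zero ws lon i w (fun k _ hk2 => hnoocc k hk2)]
          simp
      · intro x hx
        rcases List.mem_append.mp hx with hx | hx
        · have hxw : x ≠ w := fun hc => hweq (hc ▸ hx)
          rw [PySem.Dict.getD_insert_of_ne pd _ 0 hxw]
          exact hlomin x hx
        · rw [List.mem_singleton.mp hx, PySem.Dict.getD_insert_self]
          exact_mod_cast hloni
      · exact hloni
      · rw [h7]
        simp
      · intro hcf
        obtain ⟨hlen, -, -, -⟩ := h10 hcf
        have hperm : eq.Perm kws :=
          (h1.subperm (fun x hx => ((h3 x).mp hx).1)).perm_of_length_le (le_of_eq hlen.symm)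
        exact absurd (hperm.mem_iff.mpr hwk) hweq
  · -- not a keyword: both states unchanged
    have hstepA : highlight2Step kws (kws.length : Int) (pd, eq, comp, maxlen, l, u) ((i : Int), w) =
        (pd, eq, comp, maxlen, l, u) := by
      simp only [highlight2Step]
      rw [if_neg (c := w ∈ kws) hwk]
    have hstepB : highlight2AltStep (PySem.Set.ofList kws) ws (kws.length : Int)
        (count, hav, (lon : Int), maxlen, l, u) ((i : Int), w) = (count, hav, (lon : Int), maxlen, l, u) := by
      simp only [highlight2AltStep]
      rw [if_neg (by simpa [PySem.Set.mem_ofList] using hwk)]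
    rw [hstepA, hstepB]
    have hsub : ∀ x ∈ eq, x ∈ kws := fun x hx => ((h3 x).mp hx).1
    refine ⟨h1, h2, ?_, ?_, h5, h6, h7, ⟨lon, rfl, by omega, ?_, hlomin⟩, ⟨rfl, rfl, rfl⟩, ?_⟩
    · intro x
      rw [h3 x]
      constructor
      · rintro ⟨hk, j, hj, hw⟩
        exact ⟨hk, j, by omega, hw⟩
      · rintro ⟨hk, j, hj, hw⟩
        by_cases hji : j = i
        · subst hji
          rw [hiw] at hw
          exact absurd (Option.some_inj.mp hw ▸ hk) hwk
        · exact ⟨hk, j, by omega, hw⟩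
    · intro x hx
      obtain ⟨jx, hgx, hlx⟩ := h4 x hx
      refine ⟨jx, hgx, by have := hlx.1; omega, hlx.2.1, fun k hk1 hk2 => ?_⟩
      by_cases hki : k = i
      · subst hki
        rw [hiw]
        intro hc
        exact hwk ((Option.some_inj.mp hc) ▸ hsub x hx)
      · exact hlx.2.2 k hk1 (by omega)
    · intro x hx
      have hxw : x ≠ w := fun hc => hwk (hc ▸ hsub x hx)
      rw [hocc x hx, occW_snoc ws lon i x w hloni hilen hiw, if_neg (fun hc => hxw hc.symm)]
      push_cast; ring
    · intro hcf
      obtain ⟨ha, hb, hc, hd⟩ := h10 hcf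
      exact ⟨ha, hb, hc, by omega⟩

lemma hinv_fold (ws kws : List String) :
    ∀ (suf : List String) (i : Nat)
      (sA : PySem.Dict String Int × List String × Bool × Int × Int × Int)
      (sB : PySem.Dict String Int × Int × Int × Int × Int × Int),
      ws.drop i = suf → HInv ws kws i sA sB →
      HInv ws kws (i + suf.length)
        ((PySem.List.enumerate suf (i : Int)).foldl (highlight2Step kws (kws.length : Int)) sA)
        ((PySem.List.enumerate suf (i : Int)).foldl (highlight2AltStep (PySem.Set.ofList kws) ws (kws.length : Int)) sB) := by
  intro suf
  induction suf with
  | nil => intro i sA sB _ h; simpa [PySem.List.enumerate_nil] using h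
  | cons x t ih =>
      intro i sA sB hdrop h
      have hlt : i < ws.length := by
        by_contra hge
        rw [List.drop_eq_nil_of_le (by omega)] at hdrop
        exact List.cons_ne_nil x t hdrop.symm
      have hget : ws[i]? = some x := by
        have h0 : (ws.drop i)[0]? = some x := by rw [hdrop]; rfl
        rwa [List.getElem?_drop, Nat.add_zero] at h0
      have hdrop' : ws.drop (i+1) = t := by
        have : ws.drop (i+1) = (ws.drop i).drop 1 := by rw [List.drop_drop, Nat.add_comm]
        rw [this, hdrop]; rfl
      have hstep := hinv_step ws kws i x hget hlt sA sB h
      have hrec := ih (i+1) _ _ hdrop' hstep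
      have hcast : ((i : Int) + 1) = ((i + 1 : Nat) : Int) := by push_cast; ring
      have hlen : (i + 1) + t.length = i + (x :: t).length := by simp; omega
      rw [hlen] at hrec
      rw [PySem.List.enumerate_cons, List.foldl_cons, hcast]
      exact hrec

-- ===== VERDICT (by name: the statement is the Claim_ definition above) =====
theorem highlight2_spec : Claim_equal_highlight2 := by
  intro text keywords _
  unfold Spec_highlight2 highlight2 highlight2_alt
  have h0 : HInv (PySem.Str.split₀ text) keywords 0
      (PySem.Dict.empty, [], true, ((PySem.Str.split₀ text).length : Int), 0, 0)
      (PySem.Dict.empty, 0, 0, ((PySem.Str.split₀ text).length : Int), 0, 0) := by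
    refine ⟨List.nodup_nil, by simp [PySem.Dict.keys, PySem.Dict.empty], by simp, by simp,
      List.Pairwise.nil, by simp [PySem.Dict.keys, PySem.Dict.empty], by simp,
      ⟨0, by simp⟩, ⟨rfl, rfl, rfl⟩, by simp⟩
  have h := hinv_fold (PySem.Str.split₀ text) keywords (PySem.Str.split₀ text) 0 _ _ rfl h0
  obtain ⟨-, -, -, -, -, -, -, -, ⟨h1, h2, h3⟩, -⟩ := h
  simp only []
  exact Prod.ext h2 h3
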